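-- pv_equiv track=rewrite | github.com/ADevNamedDeLL/Piestructure | Piestructure.py | rainbow_text
-- ===== SOURCE A (Python) =====
-- RAINBOW_COLORS = [
--     "\033[31m",  # Red
--     "\033[33m",  # Yellow
--     "\033[32m",  # Green
--     "\033[36m",  # Cyan
--     "\033[34m",  # Blue
--     "\033[35m",  # Magenta
-- ]
--
-- def rainbow_text(text):
--     colored_text = []
--     color_count = len(RAINBOW_COLORS)
--     color_index = 0
--     for char in text:
--         if char == "\n":
--             colored_text.append(char)
--         else:
--             colored_text.append(RAINBOW_COLORS[color_index % color_count] + char)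
--             color_index += 1
--     return "".join(colored_text)
-- ===== SOURCE B (Python) =====
-- RAINBOW_COLORS = [
--     "\033[31m",  # Red
--     "\033[33m",  # Yellow
--     "\033[32m",  # Green
--     "\033[36m",  # Cyan
--     "\033[34m",  # Blue
--     "\033[35m",  # Magenta
-- ]
--
-- def rainbow_text(text):
--     # Split on newlines, color each segment with a running color index that
--     # persists across segments, and rejoin; newlines never advance the index.
--     color_count = len(RAINBOW_COLORS)
--     color_index = 0
--     colored_segments = []
--     for segment in text.split("\n"):
--         parts = []
--         for char in segment:
--             parts.append(RAINBOW_COLORS[color_index % color_count] + char)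
--             color_index += 1
--         colored_segments.append("".join(parts))
--     return "\n".join(colored_segments)
-- ===== Notes on version B (the rewrite author's own statement) =====
-- stated objective: alternative
-- what changed: B splits the text into newline-separated segments and colors whole segments with a running color index that persists across segments, then rejoins them with newlines, instead of A's single character-by-character loop that special-cases the newline inline.
import Mathlib
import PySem

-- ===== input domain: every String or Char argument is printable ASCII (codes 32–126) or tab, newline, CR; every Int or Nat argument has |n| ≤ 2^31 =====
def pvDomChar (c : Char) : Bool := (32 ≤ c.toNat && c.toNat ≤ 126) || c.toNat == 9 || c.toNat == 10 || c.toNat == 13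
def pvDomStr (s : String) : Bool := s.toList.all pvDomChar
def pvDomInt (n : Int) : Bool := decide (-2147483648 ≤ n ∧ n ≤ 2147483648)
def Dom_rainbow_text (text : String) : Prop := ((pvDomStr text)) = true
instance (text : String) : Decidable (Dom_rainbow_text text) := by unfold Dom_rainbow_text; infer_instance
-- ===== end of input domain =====

-- B replaces A's single char-by-char loop (with an inline newline branch) by split('\n') /
-- color-each-segment-with-a-running-index / '\n'.join: an alternative decomposition, same cost.

-- shared module constant RAINBOW_COLORS ("\033[31m" etc., as character lists)
def pvColors : List (List Char) :=
  [[Char.ofNat 27, '[', '3', '1', 'm'], [Char.ofNat 27, '[', '3', '3', 'm'],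
   [Char.ofNat 27, '[', '3', '2', 'm'], [Char.ofNat 27, '[', '3', '6', 'm'],
   [Char.ofNat 27, '[', '3', '4', 'm'], [Char.ofNat 27, '[', '3', '5', 'm']]

-- RAINBOW_COLORS[i % 6]: the index is always in range, so .getD [] never fires
def pvColorAt (i : Int) : List Char :=
  (PySem.List.pyGet? pvColors (PySem.Int.mod i 6)).getD []

-- ===== PORT A =====
-- A's for-loop: state = (output pieces, color_index); newline appended uncolored, else colored and index +1
def pvGoA : List Char → Int → List (List Char)
  | [], _ => []
  | c :: cs, i =>
    if c = '\n' then [c] :: pvGoA cs i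
    else (pvColorAt i ++ [c]) :: pvGoA cs (i + 1)

def rainbow_text (text : String) : String :=
  String.ofList (PySem.Chars.join [] (pvGoA text.toList 0))

-- ===== PORT B =====
-- inner loop of B: color one segment starting at color_index i, return (colored chars, final index)
def pvSegB : List Char → Int → List Char × Int
  | [], i => ([], i)
  | c :: cs, i =>
    let r := pvSegB cs (i + 1)
    ((pvColorAt i ++ [c]) ++ r.1, r.2)

-- outer loop of B: fold the running color index across the segments
def pvSegsB : List (List Char) → Int → List (List Char)
  | [], _ => []
  | s :: rest, i =>
    let p := pvSegB s i
    p.1 :: pvSegsB rest p.2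

def rainbow_text_alt (text : String) : String :=
  String.ofList (PySem.Chars.join ['\n'] (pvSegsB (List.splitOn '\n' text.toList) 0))

-- ===== PRECONDITION & SPEC =====
def Spec_rainbow_text (text : String) (out : String) : Prop := out = rainbow_text_alt text
instance (text : String) (out : String) : Decidable (Spec_rainbow_text text out) := by unfold Spec_rainbow_text; infer_instance

-- ===== CLAIM (what is proved, stated in full; the proofs are below) =====
def Claim_equal_rainbow_text : Prop := ∀ (text : String), Dom_rainbow_text text → Spec_rainbow_text text (rainbow_text text)

-- ===== LEMMAS AND PROOFS =====

lemma pv_join_nil (ps : List (List Char)) : PySem.Chars.join [] ps = ps.flatten := by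
  induction ps with
  | nil => simp [PySem.Chars.join_nil]
  | cons x t ih =>
    cases t with
    | nil => simp [PySem.Chars.join_singleton]
    | cons y r => rw [PySem.Chars.join_cons_cons]; simp_all

lemma pv_join_head (sep a b : List Char) (t : List (List Char)) :
    PySem.Chars.join sep ((a ++ b) :: t) = a ++ PySem.Chars.join sep (b :: t) := by
  cases t with
  | nil => simp [PySem.Chars.join_singleton]
  | cons y r => rw [PySem.Chars.join_cons_cons, PySem.Chars.join_cons_cons]; simp

lemma pv_main (cs : List Char) (i : Int) :
    (pvGoA cs i).flatten =
      PySem.Chars.join ['\n'] (pvSegsB (List.splitOnP (· == '\n') cs) i) := by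
  induction cs generalizing i with
  | nil => simp [pvGoA, List.splitOnP_nil, pvSegsB, pvSegB, PySem.Chars.join_singleton]
  | cons c cs ih =>
    rw [List.splitOnP_cons]
    by_cases hc : c = '\n'
    · subst hc
      simp only [pvGoA, List.flatten_cons, ih i, beq_self_eq_true, if_pos]
      obtain ⟨s, rest, hs⟩ := List.exists_cons_of_ne_nil (List.splitOnP_ne_nil (· == '\n') cs)
      rw [hs]
      simp only [pvSegsB]
      rw [PySem.Chars.join_cons_cons]
      simp [pvSegB]
    · obtain ⟨s, rest, hs⟩ := List.exists_cons_of_ne_nil (List.splitOnP_ne_nil (· == '\n') cs)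
      simp only [pvGoA, if_neg hc, List.flatten_cons, ih (i + 1), hs,
        beq_iff_eq, List.modifyHead_cons, pvSegsB, pvSegB]
      rw [pv_join_head]

-- ===== VERDICT (by name: the statement is the Claim_ definition above) =====
theorem rainbow_text_spec : Claim_equal_rainbow_text := by
  intro text _
  show _ = _
  unfold rainbow_text rainbow_text_alt
  rw [pv_join_nil, show List.splitOn '\n' text.toList = List.splitOnP (· == '\n') text.toList from rfl,
    pv_main]
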